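-- pv_equiv track=rewrite | github.com/GabrielReynes/AdventOfCode | 2025/07.py | part1
-- ===== SOURCE A (Python) =====
-- def part1(input:str):
--     lines = input.splitlines()
--
--     H = len(lines)
--     S = lines[0].find('S')
--
--     res = 0
--     stack = [S]
--     y = 1
--
--     while y < H:
--         nstack = set()
--         while stack:
--             x = stack.pop()
--             if (lines[y][x] == '^') :
--                 res += 1
--                 nstack.update((x-1, x+1))
--             else :
--                 nstack.add(x)
--
--         y += 1
--         stack = list(nstack)
--     return res
-- ===== SOURCE B (Python) =====
-- def part1(input: str):
--     lines = input.splitlines()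
--     H = len(lines)
--     S = lines[0].find('S')
--     # dynamic programming, "pull" style: instead of popping beams and pushing their
--     # children, scan every candidate column of the spread cone at each row and ask
--     # whether it is fed by a parent in the previous row's reach set
--     res = 0
--     reach = {S}
--     for y in range(1, H):
--         res += sum(lines[y][x] == '^' for x in reach)
--         reach = {x for x in range(S - y, S + y + 1)
--                  if (x in reach and lines[y][x] != '^')
--                  or (x - 1 in reach and lines[y][x - 1] == '^')
--                  or (x + 1 in reach and lines[y][x + 1] == '^')}
--     return res
-- ===== Notes on version B (the rewrite author's own statement) =====
-- stated objective: alternative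
-- what changed: B replaces A's scatter-style pop-stack simulation (pop each live beam, push its children into the next row's set, counting as it pops) by a pull-style dynamic program: for each row it scans every candidate column of the spread cone and decides membership from the previous row's reach set (kept column iff fed straight by a non-splitter parent or diagonally by a splitter parent), counting splitter hits with a separate sum per row; Pre_ excludes exactly the inputs on which A raises IndexError (a beam column outside its row, or the empty input).
import Mathlib
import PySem

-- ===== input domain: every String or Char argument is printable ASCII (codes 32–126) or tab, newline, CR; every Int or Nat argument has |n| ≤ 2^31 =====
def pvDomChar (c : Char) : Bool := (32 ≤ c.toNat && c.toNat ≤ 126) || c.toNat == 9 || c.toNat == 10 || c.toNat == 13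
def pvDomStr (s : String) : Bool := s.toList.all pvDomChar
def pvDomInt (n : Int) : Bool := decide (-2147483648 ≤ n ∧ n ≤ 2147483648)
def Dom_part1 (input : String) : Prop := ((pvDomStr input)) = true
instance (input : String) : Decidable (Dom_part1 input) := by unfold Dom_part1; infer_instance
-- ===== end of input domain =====

-- B replaces A's scatter simulation (pop each beam, push its children) by a pull-style
-- dynamic program (scan each candidate column of the cone, keep it iff a parent feeds it).

-- ===== PORT A =====
-- lines[y][x] == '^'  (y is always a valid row index; x uses Python indexing:
-- negative x wraps, out-of-range x is none, comparing unequal — unreachable under Pre_part1)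
def hitA (lines : List String) (y x : Int) : Bool :=
  PySem.Str.pyGet? (PySem.List.pyGetD lines y "") x == some '^'

-- body of A's inner 'while stack' loop (one popped x)
def innerA (lines : List String) (y : Int) (x : Int) (p : Int × PySem.Set Int) :
    Int × PySem.Set Int :=
  if hitA lines y x then (p.1 + 1, (p.2.add (x - 1)).add (x + 1)) else (p.1, p.2.add x)

-- one iteration of A's outer 'while y < H' loop: drain the stack (pop = last-first, so foldr),
-- returning the new (res, stack)
def stepA (lines : List String) (st : Int × List Int) (y : Int) : Int × PySem.Set Int :=
  st.2.foldr (innerA lines y) (st.1, PySem.Set.empty)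

def part1 (input : String) : Int :=
  let lines := PySem.Str.splitlines input
  let H : Int := lines.length
  let S : Int := PySem.Str.find (PySem.List.pyGetD lines 0 "") "S"
  ((PySem.List.pyRange 1 H 1).foldl (stepA lines) (0, [S])).1

-- ===== PORT B =====
def hitB (lines : List String) (y x : Int) : Bool :=
  PySem.Str.pyGet? (PySem.List.pyGetD lines y "") x == some '^'

-- B's pull condition for candidate column x of row y+1: fed straight by a non-splitter
-- parent, or diagonally by a splitter parent of the previous reach set
def pullB (lines : List String) (reach : PySem.Set Int) (y : Int) (x : Int) : Bool :=
  (PySem.Set.contains reach x && !(hitB lines y x)) ||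
  (PySem.Set.contains reach (x - 1) && hitB lines y (x - 1)) ||
  (PySem.Set.contains reach (x + 1) && hitB lines y (x + 1))

-- one iteration of B's 'for y in range(1, H)' loop: add this row's splitter count,
-- then rebuild reach as the set comprehension over the cone's candidate columns
def stepB (lines : List String) (S : Int) (st : Int × PySem.Set Int) (y : Int) :
    Int × PySem.Set Int :=
  (st.1 + (st.2.map (fun x => if hitB lines y x then (1 : Int) else 0)).sum,
   PySem.Set.ofList ((PySem.List.pyRange (S - y) (S + y + 1) 1).filter (pullB lines st.2 y)))

def part1_alt (input : String) : Int :=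
  let lines := PySem.Str.splitlines input
  let H : Int := lines.length
  let S : Int := PySem.Str.find (PySem.List.pyGetD lines 0 "") "S"
  ((PySem.List.pyRange 1 H 1).foldl (stepB lines S) (0, PySem.Set.ofList [S])).1

-- ===== PRECONDITION & SPEC =====
-- beam columns of row k+1 (k+1-st frontier of the cascade; frontier 0 = {S} at row 1)
def beamRow (g : List String) (s : Int) : Nat → List Int
  | 0 => [s]
  | k + 1 => PySem.List.dedup ((beamRow g s k).flatMap (fun x => if PySem.Str.pyGet? (PySem.List.pyGetD g ((k : Int) + 1) "") x == some '^' then [x - 1, x + 1] else [x]))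

-- Pre_ excludes exactly the inputs on which A raises IndexError: the empty input
-- (lines[0]) and grids where some beam column falls outside its row; every input A
-- returns on is admitted (negative in-range columns wrap in both programs alike).
def Pre_part1 (input : String) : Prop :=
  PySem.Str.splitlines input ≠ [] ∧
  ∀ k ∈ List.range ((PySem.Str.splitlines input).length - 1),
    ∀ x ∈ beamRow (PySem.Str.splitlines input)
        (PySem.Str.find (PySem.List.pyGetD (PySem.Str.splitlines input) 0 "") "S") k,
      -(PySem.Str.len (PySem.List.pyGetD (PySem.Str.splitlines input) ((k : Int) + 1) "")) ≤ x ∧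
      x < PySem.Str.len (PySem.List.pyGetD (PySem.Str.splitlines input) ((k : Int) + 1) "")

instance (input : String) : Decidable (Pre_part1 input) := by unfold Pre_part1; infer_instance

def pvWitness_part1 : String := "S\n^\n..."

def Spec_part1 (input : String) (out : Int) : Prop := out = part1_alt input
instance (input : String) (out : Int) : Decidable (Spec_part1 input out) := by
  unfold Spec_part1; infer_instance

-- ===== CLAIM =====
def Claim_equal_part1 : Prop :=
  ∀ (input : String), Dom_part1 input → Pre_part1 input → Spec_part1 input (part1 input)

-- ===== LEMMAS AND PROOFS =====

-- the set of columns a beam at (y, x) feeds in the next row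
def contrib (lines : List String) (y x : Int) : List Int :=
  if hitA lines y x then [x - 1, x + 1] else [x]

theorem hitB_eq_hitA (lines : List String) (y x : Int) :
    hitB lines y x = hitA lines y x := rfl

theorem innerA_fst (lines : List String) (y : Int) :
    ∀ (stack : List Int) (r : Int) (s : PySem.Set Int),
      (stack.foldr (innerA lines y) (r, s)).1
        = r + (stack.countP (fun x => hitA lines y x) : Int) := by
  intro stack
  induction stack with
  | nil => intro r s; simp
  | cons x xs ih =>
      intro r s
      simp only [List.foldr_cons, List.countP_cons, innerA]
      by_cases h : hitA lines y x = true
      · simp [h, ih r s]; ring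
      · simp [h, ih r s]

theorem innerA_mem (lines : List String) (y : Int) :
    ∀ (stack : List Int) (r : Int) (s : PySem.Set Int) (a : Int),
      a ∈ (stack.foldr (innerA lines y) (r, s)).2
        ↔ a ∈ s ∨ ∃ x ∈ stack, a ∈ contrib lines y x := by
  intro stack
  induction stack with
  | nil => intro r s a; simp
  | cons x xs ih =>
      intro r s a
      rw [List.foldr_cons]
      by_cases h : hitA lines y x = true
      · have hstep : innerA lines y x (xs.foldr (innerA lines y) (r, s))
            = ((xs.foldr (innerA lines y) (r, s)).1 + 1,
               (((xs.foldr (innerA lines y) (r, s)).2.add (x - 1)).add (x + 1))) := by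
          simp [innerA, h]
        have hc : contrib lines y x = [x - 1, x + 1] := by simp [contrib, h]
        rw [hstep]
        simp only [PySem.Set.mem_add, ih r s a, List.mem_cons, exists_eq_or_imp, hc,
          List.not_mem_nil, or_false]
        constructor
        · rintro (((h1 | h1) | h1) | h1)
          exacts [Or.inl h1, Or.inr (Or.inr h1), Or.inr (Or.inl (Or.inl h1)),
            Or.inr (Or.inl (Or.inr h1))]
        · rintro (h1 | (h1 | h1) | h1)
          exacts [Or.inl (Or.inl (Or.inl h1)), Or.inl (Or.inr h1), Or.inr h1,
            Or.inl (Or.inl (Or.inr h1))]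
      · have hstep : innerA lines y x (xs.foldr (innerA lines y) (r, s))
            = ((xs.foldr (innerA lines y) (r, s)).1,
               ((xs.foldr (innerA lines y) (r, s)).2.add x)) := by
          simp [innerA, h]
        have hc : contrib lines y x = [x] := by simp [contrib, h]
        rw [hstep]
        simp only [PySem.Set.mem_add, ih r s a, List.mem_cons, exists_eq_or_imp, hc,
          List.not_mem_nil, or_false]
        constructor
        · rintro ((h1 | h1) | h1)
          exacts [Or.inl h1, Or.inr (Or.inr h1), Or.inr (Or.inl h1)]
        · rintro (h1 | h1 | h1)
          exacts [Or.inl (Or.inl h1), Or.inr h1, Or.inl (Or.inr h1)]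

theorem innerA_nodup (lines : List String) (y : Int) :
    ∀ (stack : List Int) (r : Int) (s : PySem.Set Int), s.Nodup →
      (stack.foldr (innerA lines y) (r, s)).2.Nodup := by
  intro stack
  induction stack with
  | nil => intro r s hs; simpa using hs
  | cons x xs ih =>
      intro r s hs
      simp only [List.foldr_cons, innerA]
      by_cases h : hitA lines y x = true
      · simp only [h, if_true]
        exact PySem.Set.nodup_add _ _ (PySem.Set.nodup_add _ _ (ih r s hs))
      · simp only [h]
        exact PySem.Set.nodup_add _ _ (ih r s hs)

-- B's pull test picks out exactly the columns some parent of the reach set feeds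
theorem pullB_iff (lines : List String) (F : PySem.Set Int) (y a : Int) :
    pullB lines F y a = true ↔ ∃ x ∈ F, a ∈ contrib lines y x := by
  simp only [pullB, hitB_eq_hitA, Bool.or_eq_true, Bool.and_eq_true, Bool.not_eq_true',
    PySem.Set.contains_iff]
  constructor
  · rintro ((⟨hm, hh⟩ | ⟨hm, hh⟩) | ⟨hm, hh⟩)
    · exact ⟨a, hm, by simp [contrib, hh]⟩
    · exact ⟨a - 1, hm, by simp [contrib, hh]⟩
    · exact ⟨a + 1, hm, by simp [contrib, hh]⟩
  · rintro ⟨x, hx, hc⟩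
    by_cases h : hitA lines y x = true
    · have hxx : a = x - 1 ∨ a = x + 1 := by simp [contrib, h] at hc; tauto
      rcases hxx with h1 | h1
      · exact Or.inr ⟨by rw [show a + 1 = x by omega]; exact hx,
          by rw [show a + 1 = x by omega]; exact h⟩
      · exact Or.inl (Or.inr ⟨by rw [show a - 1 = x by omega]; exact hx,
          by rw [show a - 1 = x by omega]; exact h⟩)
    · have h1 : a = x := by simpa [contrib, h] using hc
      exact Or.inl (Or.inl ⟨by rw [h1]; exact hx, by rw [h1]; simpa using h⟩)

-- membership of B's rebuilt reach set (candidate range covers the whole cone)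
theorem stepB_mem (lines : List String) (S y : Int) (F : PySem.Set Int)
    (hb : ∀ x ∈ F, S - (y - 1) ≤ x ∧ x ≤ S + (y - 1)) (a : Int) :
    a ∈ PySem.Set.ofList ((PySem.List.pyRange (S - y) (S + y + 1) 1).filter (pullB lines F y))
      ↔ ∃ x ∈ F, a ∈ contrib lines y x := by
  rw [PySem.Set.mem_ofList, List.mem_filter, PySem.List.mem_pyRange_one, pullB_iff]
  constructor
  · exact fun h => h.2
  · rintro ⟨x, hx, hc⟩
    refine ⟨?_, ⟨x, hx, hc⟩⟩
    have hxb := hb x hx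
    have : x - 1 ≤ a ∧ a ≤ x + 1 := by
      unfold contrib at hc
      split_ifs at hc
      · simp only [List.mem_cons, List.not_mem_nil, or_false] at hc
        rcases hc with h1 | h1 <;> omega
      · simp only [List.mem_singleton] at hc
        omega
    omega

-- the main loop: A's (res, stack) and B's (res, reach) stay in lockstep provided the
-- two frontiers have the same members, no duplicates, and lie inside the spread cone
theorem main_loop (lines : List String) (H S : Int) :
    ∀ (n : Nat) (y : Int), (H - y).toNat = n → 1 ≤ y →
      ∀ (r : Int) (stack reach : List Int),
        stack.Nodup → reach.Nodup → (∀ a, a ∈ stack ↔ a ∈ reach) →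
        (∀ a ∈ stack, S - (y - 1) ≤ a ∧ a ≤ S + (y - 1)) →
        ((PySem.List.pyRange y H 1).foldl (stepA lines) (r, stack)).1
          = ((PySem.List.pyRange y H 1).foldl (stepB lines S) (r, reach)).1 := by
  intro n
  induction n with
  | zero =>
      intro y hn hy r stack reach _ _ _ _
      have hHy : H ≤ y := by omega
      rw [PySem.List.pyRange_one_eq_nil hHy]
      simp
  | succ m ih =>
      intro y hn hy r stack reach hns hnr hmem hb
      have hyH : y < H := by omega
      rw [PySem.List.pyRange_one_cons hyH, List.foldl_cons, List.foldl_cons]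
      -- this row's splitter count agrees
      have hperm : stack.Perm reach := (List.perm_ext_iff_of_nodup hns hnr).2 hmem
      have hcnt : r + (stack.countP (fun x => hitA lines y x) : Int)
          = r + (reach.map (fun x => if hitB lines y x then (1 : Int) else 0)).sum := by
        rw [PySem.List.sum_map_ite_one_zero (fun x => hitB lines y x) reach]
        have := hperm.countP_eq (fun x => hitA lines y x)
        simp only [hitB_eq_hitA]
        omega
      have hA : stepA lines (r, stack) y
          = (r + (stack.countP (fun x => hitA lines y x) : Int),
             (stack.foldr (innerA lines y) (r, PySem.Set.empty)).2) := by
        unfold stepA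
        exact Prod.ext (innerA_fst lines y stack r PySem.Set.empty) rfl
      -- the two next frontiers again satisfy the invariant
      have hndA := innerA_nodup lines y stack r PySem.Set.empty (by simp [PySem.Set.empty])
      have hmemA : ∀ a, a ∈ (stack.foldr (innerA lines y) (r, PySem.Set.empty)).2
          ↔ ∃ x ∈ stack, a ∈ contrib lines y x := by
        intro a
        rw [innerA_mem lines y stack r PySem.Set.empty a]
        simp [PySem.Set.empty]
      have hbF : ∀ x ∈ reach, S - (y - 1) ≤ x ∧ x ≤ S + (y - 1) := by
        intro x hx; exact hb x ((hmem x).2 hx)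
      have hmemAB : ∀ a, a ∈ (stack.foldr (innerA lines y) (r, PySem.Set.empty)).2
          ↔ a ∈ PySem.Set.ofList
              ((PySem.List.pyRange (S - y) (S + y + 1) 1).filter (pullB lines reach y)) := by
        intro a
        rw [hmemA a, stepB_mem lines S y reach hbF a]
        constructor
        · rintro ⟨x, hx, hc⟩; exact ⟨x, (hmem x).1 hx, hc⟩
        · rintro ⟨x, hx, hc⟩; exact ⟨x, (hmem x).2 hx, hc⟩
      have hbA : ∀ a ∈ (stack.foldr (innerA lines y) (r, PySem.Set.empty)).2,
          S - (y + 1 - 1) ≤ a ∧ a ≤ S + (y + 1 - 1) := by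
        intro a ha
        rcases (hmemA a).1 ha with ⟨x, hx, hc⟩
        have hxb := hb x hx
        have : x - 1 ≤ a ∧ a ≤ x + 1 := by
          unfold contrib at hc
          split_ifs at hc
          · simp only [List.mem_cons, List.not_mem_nil, or_false] at hc
            rcases hc with h1 | h1 <;> omega
          · simp only [List.mem_singleton] at hc
            omega
        omega
      have hB : stepB lines S (r, reach) y
          = (r + (reach.map (fun x => if hitB lines y x then (1 : Int) else 0)).sum,
             PySem.Set.ofList
               ((PySem.List.pyRange (S - y) (S + y + 1) 1).filter (pullB lines reach y))) := rfl
      rw [hA, hB, ← hcnt]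
      exact ih (y + 1) (by omega) (by omega) _ _ _ hndA (PySem.Set.nodup_ofList _) hmemAB hbA

theorem parts_agree (input : String) : part1 input = part1_alt input := by
  simp only [part1, part1_alt]
  refine main_loop (PySem.Str.splitlines input) ((PySem.Str.splitlines input).length : Int)
    (PySem.Str.find (PySem.List.pyGetD (PySem.Str.splitlines input) 0 "") "S")
    (((PySem.Str.splitlines input).length : Int) - 1).toNat 1 rfl le_rfl 0 _ _
    (List.nodup_singleton _) (PySem.Set.nodup_ofList _)
    (fun a => by rw [PySem.Set.mem_ofList]) (fun a ha => ?_)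
  have h1 := List.mem_singleton.1 ha
  subst h1
  omega

-- ===== VERDICT =====
theorem part1_spec : Claim_equal_part1 := by
  intro input _ _
  unfold Spec_part1
  exact parts_agree input
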